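-- pv_equiv track=rewrite | github.com/Aarupa/infi-backend | authapp/common_utils.py | is_valid_page
-- ===== SOURCE A (Python) =====
-- def is_valid_page(url):
--     allowed_extensions = ('.php', '.html', '.htm', '')  # Allow these
--     disallowed_extensions = (
--         '.jpg', '.jpeg', '.png', '.gif', '.svg', '.ico',
--         '.pdf', '.zip', '.rar', '.mp4', '.mp3', '.wav',
--         '.css', '.js', '.json', '.xml'
--     )
--
--     lower_url = url.lower()
--     if any(lower_url.endswith(ext) for ext in disallowed_extensions):
--         return False
--     if '.' in lower_url:
--         return any(lower_url.endswith(ext) for ext in allowed_extensions)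
--     return True
-- ===== SOURCE B (Python) =====
-- _DISALLOWED = frozenset((
--     '.jpg', '.jpeg', '.png', '.gif', '.svg', '.ico',
--     '.pdf', '.zip', '.rar', '.mp4', '.mp3', '.wav',
--     '.css', '.js', '.json', '.xml'
-- ))
--
--
-- def is_valid_page(url):
--     # Scan the lowercased url backwards; the first '.' seen from the end
--     # delimits the extension.  No dot at all means no extension to reject.
--     ext_rev = []
--     for ch in reversed(url.lower()):
--         if ch == '.':
--             return ('.' + ''.join(reversed(ext_rev))) not in _DISALLOWED
--         ext_rev.append(ch)
--     return True
-- ===== Notes on version B (the rewrite author's own statement) =====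
-- stated objective: alternative
-- what changed: Instead of testing the whole url with endswith against 20 extension candidates (and a dead always-true allowed check), B scans the lowercased url once from the end, extracts the extension after the last dot, and does a single frozenset membership test.
import Mathlib
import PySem

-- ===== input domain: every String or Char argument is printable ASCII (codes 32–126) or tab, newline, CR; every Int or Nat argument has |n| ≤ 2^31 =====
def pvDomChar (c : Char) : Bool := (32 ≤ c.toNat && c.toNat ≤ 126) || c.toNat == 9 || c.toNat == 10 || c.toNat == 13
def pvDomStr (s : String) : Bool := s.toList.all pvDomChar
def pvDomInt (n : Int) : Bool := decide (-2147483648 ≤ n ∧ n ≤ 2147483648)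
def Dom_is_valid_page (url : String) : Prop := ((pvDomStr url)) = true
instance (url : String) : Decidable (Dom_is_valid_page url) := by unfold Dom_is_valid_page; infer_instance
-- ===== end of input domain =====

-- B replaces A's 20 whole-url endswith tests (including an always-true allowed check)
-- with one backward scan that extracts the extension after the last dot and a single
-- set membership test ('alternative': different traversal, similar cost).

-- ===== PORT A =====
def pvAllowedA : List String := [".php", ".html", ".htm", ""]
def pvDisallowedA : List String :=
  [".jpg", ".jpeg", ".png", ".gif", ".svg", ".ico",
   ".pdf", ".zip", ".rar", ".mp4", ".mp3", ".wav",
   ".css", ".js", ".json", ".xml"]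

def is_valid_page (url : String) : Bool :=
  let lower_url := PySem.Str.lower url
  if pvDisallowedA.any (fun ext => PySem.Str.endswith lower_url ext) then false
  else if PySem.Str.isIn "." lower_url then
    pvAllowedA.any (fun ext => PySem.Str.endswith lower_url ext)
  else true

-- ===== PORT B =====
def pvBadExts : PySem.Set String :=
  PySem.Set.ofList
    [".jpg", ".jpeg", ".png", ".gif", ".svg", ".ico",
     ".pdf", ".zip", ".rar", ".mp4", ".mp3", ".wav",
     ".css", ".js", ".json", ".xml"]

-- the 'for ch in reversed(url.lower())' loop of Source B; acc mirrors ext_rev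
def pvScanRev (acc : List Char) : List Char → Bool
  | [] => true
  | c :: rest =>
    if c = '.' then !(PySem.Set.contains pvBadExts (String.ofList ('.' :: acc.reverse)))
    else pvScanRev (acc ++ [c]) rest

def is_valid_page_alt (url : String) : Bool :=
  pvScanRev [] (PySem.Chars.lower url.toList).reverse

-- ===== PRECONDITION & SPEC =====
def Spec_is_valid_page (url : String) (out : Bool) : Prop := out = is_valid_page_alt url
instance (url : String) (out : Bool) : Decidable (Spec_is_valid_page url out) := by unfold Spec_is_valid_page; infer_instance

-- ===== CLAIM (what is proved, stated in full; the proofs are below) =====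
def Claim_equal_is_valid_page : Prop := ∀ (url : String), Dom_is_valid_page url → Spec_is_valid_page url (is_valid_page url)

-- ===== LEMMAS AND PROOFS =====

-- a list of shape v ++ ['.'] (v dot-free) is a prefix of acc ++ '.'::R (acc dot-free) iff acc = v
lemma pv_prefix_dot (v acc R : List Char) (hv : '.' ∉ v) (hacc : '.' ∉ acc) :
    (v ++ ['.'] <+: acc ++ '.' :: R) ↔ acc = v := by
  induction acc generalizing v with
  | nil =>
    cases v with
    | nil => simp
    | cons x v' =>
      simp only [List.cons_append, List.nil_append, List.cons_prefix_cons]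
      constructor
      · rintro ⟨rfl, -⟩; exact absurd (by simp) hv
      · rintro h; cases h
  | cons a acc' ih =>
    have ha : a ≠ '.' := fun h => hacc (by simp [h])
    cases v with
    | nil =>
      simp only [List.nil_append, List.cons_append, List.cons_prefix_cons]
      constructor
      · rintro ⟨h, -⟩; exact absurd h.symm ha
      · rintro h; cases h
    | cons x v' =>
      have hv' : '.' ∉ v' := fun h => hv (by simp [h])
      have hacc' : '.' ∉ acc' := fun h => hacc (by simp [h])
      simp only [List.cons_append, List.cons_prefix_cons]
      rw [ih v' hv' hacc']
      constructor
      · rintro ⟨rfl, rfl⟩; rfl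
      · rintro h; injection h with h1 h2; exact ⟨h1.symm, h2⟩

-- every disallowed extension is '.' followed by a dot-free tail
lemma pv_dis_shape : ∀ e ∈ pvDisallowedA,
    e.toList.head? = some '.' ∧ '.' ∉ e.toList.tail := by decide

-- B's set holds exactly A's disallowed tuple (the literal list is duplicate-free)
lemma pv_sets_eq : (pvBadExts : List String) = pvDisallowedA := by decide

-- for a disallowed e, 'e reversed is a prefix of acc ++ '.'::R' pins down acc as e's tail reversed
lemma pv_elem_iff (e : String) (he : e ∈ pvDisallowedA) (acc R : List Char) (hacc : '.' ∉ acc) :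
    (e.toList.reverse <+: acc ++ '.' :: R) ↔ String.ofList ('.' :: acc.reverse) = e := by
  obtain ⟨h1, h2⟩ := pv_dis_shape e he
  obtain ⟨t, ht⟩ : ∃ t, e.toList = '.' :: t := by
    cases h : e.toList with
    | nil => simp [h] at h1
    | cons x tl => simp [h] at h1; exact ⟨tl, by simp [h1]⟩
  have h2' : '.' ∉ t.reverse := by simpa [ht] using h2
  rw [ht, List.reverse_cons, pv_prefix_dot t.reverse acc R h2' hacc]
  rw [String.ext_iff, String.toList_ofList, ht]
  constructor
  · rintro rfl; simp
  · intro h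
    injection h with _ h
    rw [← h, List.reverse_reverse]

-- loop invariant: the backward scan with dot-free acc decides
-- 'no disallowed extension is a suffix of the string whose reversal is acc ++ R'
lemma pv_scan_spec (R : List Char) : ∀ acc : List Char, '.' ∉ acc →
    pvScanRev acc R
      = !(pvDisallowedA.any (fun e => PySem.Chars.endswith (acc ++ R).reverse e.toList)) := by
  induction R with
  | nil =>
    intro acc hacc
    simp only [pvScanRev, List.append_nil]
    have : pvDisallowedA.any (fun e => PySem.Chars.endswith acc.reverse e.toList) = false := by
      simp only [List.any_eq_false]
      intro e he
      obtain ⟨h1, -⟩ := pv_dis_shape e he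
      rw [Bool.not_eq_true, Bool.eq_false_iff, Ne, PySem.Chars.endswith_iff]
      intro hsuf
      have hdot : '.' ∈ e.toList := by
        cases h : e.toList with
        | nil => simp [h] at h1
        | cons x tl => simp [h] at h1; simp [h1]
      exact hacc (List.mem_reverse.mp (hsuf.subset hdot))
    rw [this]; rfl
  | cons c R' ih =>
    intro acc hacc
    by_cases hc : c = '.'
    · subst hc
      simp only [pvScanRev, reduceIte]
      congr 1
      rw [Bool.eq_iff_iff]
      simp only [PySem.Set.contains, List.contains_iff_mem, pv_sets_eq, List.any_eq_true]
      constructor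
      · intro hmem
        refine ⟨_, hmem, ?_⟩
        rw [PySem.Chars.endswith_iff, ← List.reverse_prefix, List.reverse_reverse]
        exact (pv_elem_iff _ hmem acc R' hacc).mpr rfl
      · rintro ⟨e, he, hend⟩
        rw [PySem.Chars.endswith_iff, ← List.reverse_prefix, List.reverse_reverse] at hend
        rw [(pv_elem_iff e he acc R' hacc).mp hend]
        exact he
    · simp only [pvScanRev, if_neg hc]
      have hacc' : '.' ∉ acc ++ [c] := by
        intro h; rcases List.mem_append.mp h with h | h
        · exact hacc h
        · exact hc (List.mem_singleton.mp h).symm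
      rw [ih (acc ++ [c]) hacc']; simp only [List.append_assoc, List.singleton_append]

-- ===== VERDICT (by name: the statement is the Claim_ definition above) =====
theorem is_valid_page_spec : Claim_equal_is_valid_page := by
  intro url _
  unfold Spec_is_valid_page is_valid_page is_valid_page_alt
  rw [pv_scan_spec ((PySem.Chars.lower url.toList).reverse) [] (List.not_mem_nil)]
  simp only [List.nil_append, List.reverse_reverse]
  have hallow : pvAllowedA.any (fun ext => PySem.Str.endswith (PySem.Str.lower url) ext)
      = true := by
    simp [pvAllowedA, PySem.Chars.endswith_iff]
  simp only [PySem.Str.endswith_eq, PySem.Str.toList_lower] at hallow ⊢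
  rw [hallow]
  split_ifs <;> simp_all
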